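-- pv_equiv track=rewrite | github.com/frankieliu/problems | interview/Sorting/lexi.py | solve
-- ===== SOURCE A (Python) =====
-- def solve(arr):
--     c = {}
--     v = {}
--     for A in arr:
--         a, b = A.split(" ");
--         if a in c:
--             c[a] += 1
--             if b > v[a]:
--                 v[a] = b
--         else:
--             c[a] = 1
--             v[a] = b
--
--     out = []
--     for a, b in c.items():
--         out.append("{}:{},{}".format(a, b, v[a]))
--     return out
--
-- arr = [
--   "key1 abcd",
--   "key2 zzz",
--   "key1 hello",
--   "key3 world",
--   "key1 hello"
-- ]
-- ===== SOURCE B (Python) =====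
-- def solve(arr):
--     d = {}
--     for A in arr:
--         a, b = A.split(" ")
--         d.setdefault(a, []).append(b)
--     return ["{}:{},{}".format(a, len(vs), max(vs)) for a, vs in d.items()]
-- ===== Notes on version B (the rewrite author's own statement) =====
-- stated objective: alternative
-- what changed: B collects every value into a per-key list via dict.setdefault(...).append and computes len/max per key in a separate aggregation pass, replacing A's two parallel dicts with incremental count++ and branchy running-max updates.
import Mathlib
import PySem

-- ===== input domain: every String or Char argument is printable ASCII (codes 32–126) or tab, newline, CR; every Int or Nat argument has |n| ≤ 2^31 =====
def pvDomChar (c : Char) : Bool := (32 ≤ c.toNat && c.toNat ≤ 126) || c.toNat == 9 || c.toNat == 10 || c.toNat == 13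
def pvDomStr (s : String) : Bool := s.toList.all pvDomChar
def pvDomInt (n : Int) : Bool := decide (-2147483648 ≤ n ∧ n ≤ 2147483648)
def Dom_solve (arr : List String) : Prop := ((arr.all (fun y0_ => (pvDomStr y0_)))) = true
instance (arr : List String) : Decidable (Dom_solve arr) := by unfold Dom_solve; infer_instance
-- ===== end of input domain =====

-- B groups all values per key into a per-key list (dict.setdefault(...).append) and aggregates
-- count/max in a separate pass, instead of A's incremental count++/running-max bookkeeping;
-- objective: alternative decomposition, same cost.

-- ===== PORT A =====
-- one loop iteration of A: split the line, then count++ / running-max update per key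
def pvStepA (st : PySem.Dict String Int × PySem.Dict String String) (A : String) :
    PySem.Dict String Int × PySem.Dict String String :=
  let parts := (PySem.Str.split? A " ").getD []
  let a := parts.getD 0 ""
  let b := parts.getD 1 ""
  if st.1.contains a then
    (st.1.insert a (st.1.getD a 0 + 1), if st.2.getD a "" < b then st.2.insert a b else st.2)
  else
    (st.1.insert a 1, st.2.insert a b)

def solve (arr : List String) : List String :=
  let st := arr.foldl pvStepA (PySem.Dict.empty, PySem.Dict.empty)
  st.1.items.foldl (fun out p =>
    out ++ [p.1 ++ ":" ++ PySem.Int.toStr p.2 ++ "," ++ st.2.getD p.1 ""]) []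

-- ===== PORT B =====
-- one loop iteration of B: split the line, append the value to the key's list
def pvStepB (d : PySem.Dict String (List String)) (A : String) : PySem.Dict String (List String) :=
  let parts := (PySem.Str.split? A " ").getD []
  d.modify (parts.getD 0 "") [] (fun l => l ++ [parts.getD 1 ""])

def solve_alt (arr : List String) : List String :=
  let d := arr.foldl pvStepB PySem.Dict.empty
  d.items.map (fun p =>
    p.1 ++ ":" ++ PySem.Int.toStr (p.2.length : Int) ++ "," ++ ((PySem.List.max? p.2 (fun x => x)).getD ""))

-- ===== PRECONDITION & SPEC =====
-- Pre_ excludes lines that do not split on a single space into exactly two fields: there Python A's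
-- two-target unpacking `a, b = A.split(" ")` raises ValueError (B raises identically).
def Pre_solve (arr : List String) : Prop :=
  ∀ s ∈ arr, ((PySem.Str.split? s " ").getD []).length = 2
instance (arr : List String) : Decidable (Pre_solve arr) := by unfold Pre_solve; infer_instance

def pvWitness_solve : List String := ["key1 abcd", "key2 zzz", "key1 hello"]

def Spec_solve (arr : List String) (out : List String) : Prop := out = solve_alt arr
instance (arr : List String) (out : List String) : Decidable (Spec_solve arr out) := by unfold Spec_solve; infer_instance

-- ===== CLAIM (what is proved, stated in full; the proofs are below) =====
def Claim_equal_solve : Prop := ∀ (arr : List String), Dom_solve arr → Pre_solve arr → Spec_solve arr (solve arr)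

-- ===== LEMMAS AND PROOFS =====

-- Invariant tying A's (count dict, running-max dict) state to B's per-key value-list dict.
def pvInv (c : PySem.Dict String Int) (v : PySem.Dict String String)
    (d : PySem.Dict String (List String)) : Prop :=
  c.keys = d.keys ∧ d.keys.Nodup ∧
  ∀ k ∈ d.keys, d.getD k [] ≠ [] ∧ c.getD k 0 = ((d.getD k []).length : Int) ∧
    v.getD k "" = ((PySem.List.max? (d.getD k []) (fun x => x)).getD "")

theorem pv_if_lt_eq_max {m b : String} : (if m < b then b else m) = max b m := by
  rcases lt_or_ge m b with h | h
  · simp [h, max_eq_left h.le]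
  · simp [not_lt.mpr h, max_eq_right h]

theorem pv_max_append (l : List String) (b : String) (hne : l ≠ []) :
    ((PySem.List.max? (l ++ [b]) (fun x => x)).getD "") =
      (if ((PySem.List.max? l (fun x => x)).getD "") < b then b
       else ((PySem.List.max? l (fun x => x)).getD "")) := by
  obtain ⟨x, t, rfl⟩ := List.exists_cons_of_ne_nil hne
  rw [List.cons_append, PySem.List.max?_id_cons, PySem.List.max?_id_cons, pv_if_lt_eq_max]
  simp [List.foldl_append, max_comm]

theorem pvInv_step (c : PySem.Dict String Int) (v : PySem.Dict String String)
    (d : PySem.Dict String (List String)) (A : String) (h : pvInv c v d) :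
    pvInv (pvStepA (c, v) A).1 (pvStepA (c, v) A).2 (pvStepB d A) := by
  obtain ⟨hck, hnd, hk⟩ := h
  set parts := (PySem.Str.split? A " ").getD [] with hparts
  set a := parts.getD 0 "" with ha
  set b := parts.getD 1 "" with hb
  have hcd : c.contains a = d.contains a := by
    by_cases hm : a ∈ d.keys
    · rw [(PySem.Dict.contains_iff_mem_keys c a).mpr (hck ▸ hm),
          (PySem.Dict.contains_iff_mem_keys d a).mpr hm]
    · have h1 : c.contains a ≠ true := fun hc => hm (hck ▸ (PySem.Dict.contains_iff_mem_keys c a).mp hc)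
      have h2 : d.contains a ≠ true := fun hc => hm ((PySem.Dict.contains_iff_mem_keys d a).mp hc)
      simp only [Bool.not_eq_true] at h1 h2
      rw [h1, h2]
  have hdk : (pvStepB d A).keys = if d.contains a then d.keys else d.keys ++ [a] := by
    rw [show pvStepB d A = d.modify a [] (fun l => l ++ [b]) from rfl, PySem.Dict.keys_modify]
    by_cases hc : d.contains a = true
    · rw [PySem.Dict.keys_insert_of_contains _ _ hc, hc]; simp
    · simp only [Bool.not_eq_true] at hc
      rw [PySem.Dict.keys_insert_of_not_contains _ _ hc, hc]; simp
  by_cases hc : c.contains a = true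
  · -- existing key
    have hdc : d.contains a = true := hcd ▸ hc
    have hmem : a ∈ d.keys := (PySem.Dict.contains_iff_mem_keys d a).mp hdc
    simp only [pvStepA, ← hparts, ← ha, ← hb, hc, if_true]
    refine ⟨?_, ?_, ?_⟩
    · rw [PySem.Dict.keys_insert_of_contains _ _ hc, hdk, hdc]; simpa using hck
    · rw [hdk, hdc]; simpa using hnd
    · intro k hkmem
      rw [hdk, hdc, if_pos rfl] at hkmem
      obtain ⟨hne, hcnt, hmax⟩ := hk k hkmem
      have hdget : (pvStepB d A).getD k [] =
          if k = a then d.getD a [] ++ [b] else d.getD k [] := by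
        rw [show pvStepB d A = d.modify a [] (fun l => l ++ [b]) from rfl, PySem.Dict.getD_modify]
      by_cases hka : k = a
      · subst hka
        obtain ⟨hne', hcnt', hmax'⟩ := hk a hmem
        rw [hdget, if_pos rfl]
        refine ⟨by simp, ?_, ?_⟩
        · rw [PySem.Dict.getD_insert, if_pos rfl, hcnt', List.length_append,
              List.length_singleton]; push_cast; ring
        · rw [pv_max_append _ _ hne', ← hmax']
          by_cases hlt : v.getD a "" < b
          · rw [if_pos hlt, if_pos hlt, PySem.Dict.getD_insert, if_pos rfl]
          · rw [if_neg hlt, if_neg hlt]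
      · rw [hdget, if_neg hka]
        refine ⟨hne, ?_, ?_⟩
        · rw [PySem.Dict.getD_insert, if_neg hka, hcnt]
        · by_cases hlt : v.getD a "" < b
          · rw [if_pos hlt, PySem.Dict.getD_insert, if_neg hka, hmax]
          · rw [if_neg hlt, hmax]
  · -- fresh key
    have hc' : c.contains a = false := by simpa using hc
    have hdc : d.contains a = false := hcd ▸ hc'
    have hmem : a ∉ d.keys := fun hm => by
      rw [(PySem.Dict.contains_iff_mem_keys d a).mpr hm] at hdc; exact absurd hdc (by simp)
    simp only [pvStepA, ← hparts, ← ha, ← hb, hc', Bool.false_eq_true, if_false]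
    refine ⟨?_, ?_, ?_⟩
    · rw [PySem.Dict.keys_insert_of_not_contains _ _ hc', hdk, hdc]; simp [hck]
    · rw [hdk, hdc]
      simp only [Bool.false_eq_true, if_false]
      rw [List.nodup_append]
      refine ⟨hnd, List.nodup_singleton a, ?_⟩
      intro x hx y hy
      simp only [List.mem_singleton] at hy
      exact hy ▸ fun he => hmem (he ▸ hx)
    · intro k hkmem
      rw [hdk, hdc] at hkmem
      simp only [Bool.false_eq_true, if_false, List.mem_append, List.mem_singleton] at hkmem
      have hdget : (pvStepB d A).getD k [] =
          if k = a then d.getD a [] ++ [b] else d.getD k [] := by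
        rw [show pvStepB d A = d.modify a [] (fun l => l ++ [b]) from rfl, PySem.Dict.getD_modify]
      rcases hkmem with hkd | hka
      · have hka : k ≠ a := fun he => hmem (he ▸ hkd)
        obtain ⟨hne, hcnt, hmax⟩ := hk k hkd
        rw [hdget, if_neg hka]
        exact ⟨hne, by rw [PySem.Dict.getD_insert, if_neg hka, hcnt],
               by rw [PySem.Dict.getD_insert, if_neg hka, hmax]⟩
      · subst hka
        have hda : d.getD a [] = [] := PySem.Dict.getD_of_not_contains _ _ hdc
        rw [hdget, if_pos rfl, hda]
        refine ⟨by simp, ?_, ?_⟩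
        · rw [PySem.Dict.getD_insert, if_pos rfl]; simp
        · rw [PySem.Dict.getD_insert, if_pos rfl]
          simp [PySem.List.max?_id_cons]

theorem pvInv_loop (arr : List String) (c : PySem.Dict String Int)
    (v : PySem.Dict String String) (d : PySem.Dict String (List String)) (h : pvInv c v d) :
    pvInv (arr.foldl pvStepA (c, v)).1 (arr.foldl pvStepA (c, v)).2 (arr.foldl pvStepB d) := by
  induction arr generalizing c v d with
  | nil => exact h
  | cons A rest ih =>
    simp only [List.foldl_cons]
    have := pvInv_step c v d A h
    have hp : pvStepA (c, v) A = ((pvStepA (c, v) A).1, (pvStepA (c, v) A).2) := rfl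
    rw [hp]
    exact ih _ _ _ this

theorem pvInv_empty : pvInv PySem.Dict.empty PySem.Dict.empty PySem.Dict.empty := by
  refine ⟨rfl, ?_, ?_⟩ <;> simp [PySem.Dict.keys, PySem.Dict.empty]

-- ===== VERDICT (by name: the statement is the Claim_ definition above) =====
theorem solve_spec : Claim_equal_solve := by
  intro arr _ _
  obtain ⟨hck, hnd, hk⟩ := pvInv_loop arr PySem.Dict.empty PySem.Dict.empty PySem.Dict.empty pvInv_empty
  show (List.foldl pvStepA (PySem.Dict.empty, PySem.Dict.empty) arr).1.items.foldl
      (fun out p => out ++ [p.1 ++ ":" ++ PySem.Int.toStr p.2 ++ "," ++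
        (List.foldl pvStepA (PySem.Dict.empty, PySem.Dict.empty) arr).2.getD p.1 ""]) []
    = (List.foldl pvStepB PySem.Dict.empty arr).items.map (fun p =>
        p.1 ++ ":" ++ PySem.Int.toStr (p.2.length : Int) ++ "," ++
        ((PySem.List.max? p.2 (fun x => x)).getD ""))
  set st := List.foldl pvStepA (PySem.Dict.empty, PySem.Dict.empty) arr with hst
  set d := List.foldl pvStepB PySem.Dict.empty arr with hd
  rw [PySem.List.foldl_append_singleton_eq_map, List.nil_append,
      PySem.Dict.items_eq_map_keys st.1 (hck ▸ hnd) 0,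
      PySem.Dict.items_eq_map_keys d hnd [], List.map_map, List.map_map, hck]
  refine List.map_congr_left fun k hkmem => ?_
  obtain ⟨_, hcnt, hmax⟩ := hk k hkmem
  simp only [Function.comp]
  rw [hcnt, hmax]
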